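-- pv_equiv track=rewrite | github.com/yhli1016/misc | physics/symtb/symtb/model.py | check_conj
-- ===== SOURCE A (Python) =====
-- from typing import Tuple, List, Union
--
-- def check_conj(hop_ind: Tuple[int, ...], i: int = 0) -> bool:
--     """
--     Check whether to take the conjugate part of the hopping term.
--
--     :param hop_ind: (r_a, r_b, r_c, orb_i, orb_j), hopping index
--     :param i: component index
--     :return: whether to take conjugate
--     """
--     if hop_ind[i] > 0:
--         return False
--     elif hop_ind[i] < 0:
--         return True
--     else:
--         if i < 2:
--             return check_conj(hop_ind, i+1)
--         else:
--             return hop_ind[3] > hop_ind[4]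
-- ===== SOURCE B (Python) =====
-- def check_conj(hop_ind, i=0):
--     """Iterative form: advance past leading zero components, then decide once
--     from the sign of the stopping component (orbital tie-break if still zero)."""
--     j = i
--     while hop_ind[j] == 0 and j < 2:
--         j += 1
--     s = hop_ind[j]
--     if s == 0:
--         return hop_ind[3] > hop_ind[4]
--     return s < 0
-- ===== Notes on version B (the rewrite author's own statement) =====
-- stated objective: simpler
-- what changed: A's three-way recursion is replaced by an iterative while-loop that advances an index past leading zero components and then decides once from the sign of the stopping component (orbital tie-break if it is still zero); same accesses, same cost.
import Mathlib
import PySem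

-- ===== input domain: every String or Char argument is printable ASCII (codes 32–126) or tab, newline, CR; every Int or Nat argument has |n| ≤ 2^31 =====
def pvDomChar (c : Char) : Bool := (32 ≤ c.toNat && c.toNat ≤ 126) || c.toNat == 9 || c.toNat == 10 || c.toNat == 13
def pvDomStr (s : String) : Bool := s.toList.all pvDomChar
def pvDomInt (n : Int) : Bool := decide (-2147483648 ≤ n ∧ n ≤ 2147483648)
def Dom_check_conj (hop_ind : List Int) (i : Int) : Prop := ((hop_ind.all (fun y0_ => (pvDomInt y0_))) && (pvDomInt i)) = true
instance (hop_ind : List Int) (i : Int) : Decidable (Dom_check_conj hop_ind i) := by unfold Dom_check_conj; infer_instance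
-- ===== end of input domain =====

-- B replaces A's recursion by an iterative scan past leading zero components (simpler decomposition, same cost).

-- ===== PORT A =====
-- literal port of A's recursion; subscripts use pyGetD with default 0 (Pre_ excludes the
-- out-of-range accesses, on which the Python raises IndexError)
def check_conj (hop_ind : List Int) (i : Int) : Bool :=
  if PySem.List.pyGetD hop_ind i 0 > 0 then false
  else if PySem.List.pyGetD hop_ind i 0 < 0 then true
  else if h : i < 2 then check_conj hop_ind (i + 1)
  else PySem.List.pyGetD hop_ind 3 0 > PySem.List.pyGetD hop_ind 4 0
termination_by (2 - i).toNat
decreasing_by omega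

-- ===== PORT B =====
-- the while-loop of Source B: advance j past zero components while j < 2
def scanJ (hop_ind : List Int) (j : Int) : Int :=
  if h : PySem.List.pyGetD hop_ind j 0 = 0 ∧ j < 2 then scanJ hop_ind (j + 1) else j
termination_by (2 - j).toNat
decreasing_by omega

def check_conj_alt (hop_ind : List Int) (i : Int) : Bool :=
  let s := PySem.List.pyGetD hop_ind (scanJ hop_ind i) 0
  if s = 0 then PySem.List.pyGetD hop_ind 3 0 > PySem.List.pyGetD hop_ind 4 0
  else s < 0

-- ===== PRECONDITION & SPEC =====
-- Exactly the inputs on which the Python A returns (no IndexError): the start index is in range,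
-- every index j ≤ 2 that the walk reaches through a run of zero components is in range, and
-- if every scanned component is zero the orbital tie-break hop_ind[3] > hop_ind[4] needs length ≥ 5.
def Pre_check_conj (hop_ind : List Int) (i : Int) : Prop :=
  let n : Int := (hop_ind.length : Int)
  let lo : Int := max i (-n)
  (-n ≤ i ∧ i < n) ∧
  (∀ j ∈ PySem.List.pyRange (lo + 1) 3 1,
      (∀ k ∈ PySem.List.pyRange lo j 1, PySem.List.pyGet? hop_ind k = some 0) → j < n) ∧
  ((∀ k ∈ PySem.List.pyRange lo (if lo < 2 then 3 else lo + 1) 1,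
      PySem.List.pyGet? hop_ind k = some 0) → 5 ≤ n)
instance (hop_ind : List Int) (i : Int) : Decidable (Pre_check_conj hop_ind i) := by
  unfold Pre_check_conj; infer_instance

def pvWitness_check_conj : List Int × Int := ([0, 0, 0, 1, 2], 0)

def Spec_check_conj (hop_ind : List Int) (i : Int) (out : Bool) : Prop := out = check_conj_alt hop_ind i
instance (hop_ind : List Int) (i : Int) (out : Bool) : Decidable (Spec_check_conj hop_ind i out) := by unfold Spec_check_conj; infer_instance

-- ===== CLAIM (what is proved, stated in full; the proofs are below) =====
def Claim_equal_check_conj : Prop := ∀ (hop_ind : List Int) (i : Int), Dom_check_conj hop_ind i → Pre_check_conj hop_ind i → Spec_check_conj hop_ind i (check_conj hop_ind i)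

-- ===== LEMMAS AND PROOFS =====

-- B's loop is the identity on its stopping states
theorem scanJ_stop (hop_ind : List Int) (j : Int)
    (h : ¬ (PySem.List.pyGetD hop_ind j 0 = 0 ∧ j < 2)) : scanJ hop_ind j = j := by
  rw [scanJ]; exact dif_neg h

-- B's loop takes one step on a zero component below index 2
theorem scanJ_step (hop_ind : List Int) (j : Int)
    (h : PySem.List.pyGetD hop_ind j 0 = 0 ∧ j < 2) : scanJ hop_ind j = scanJ hop_ind (j + 1) := by
  rw [scanJ]; exact dif_pos h

-- the two ports agree on EVERY input (both read out-of-range subscripts as 0 via pyGetD)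
theorem check_conj_eq_alt (n : Nat) (hop_ind : List Int) (i : Int) (hn : (2 - i).toNat ≤ n) :
    check_conj hop_ind i = check_conj_alt hop_ind i := by
  induction n generalizing i with
  | zero =>
    have h2 : 2 ≤ i := by omega
    rw [check_conj, check_conj_alt, scanJ_stop hop_ind i (by simp [not_lt.mpr h2])]
    rcases lt_trichotomy (PySem.List.pyGetD hop_ind i 0) 0 with hv | hv | hv
    · simp [hv, hv.ne, le_of_lt hv]
    · simp [hv, not_lt.mpr h2]
    · simp [hv, hv.ne', not_lt.mpr (le_of_lt hv)]
  | succ m ih =>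
    rw [check_conj, check_conj_alt]
    rcases lt_trichotomy (PySem.List.pyGetD hop_ind i 0) 0 with hv | hv | hv
    · rw [scanJ_stop hop_ind i (by simp [hv.ne])]
      simp [hv, hv.ne, le_of_lt hv]
    · by_cases h2 : i < 2
      · rw [scanJ_step hop_ind i ⟨hv, h2⟩]
        simp only [hv, lt_irrefl, if_false, dif_pos h2]
        rw [ih (i + 1) (by omega), check_conj_alt]
      · rw [scanJ_stop hop_ind i (by simp [h2])]
        simp [hv, h2]
    · rw [scanJ_stop hop_ind i (by simp [hv.ne'])]
      simp [hv, hv.ne', not_lt.mpr (le_of_lt hv)]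

-- ===== VERDICT (by name: the statement is the Claim_ definition above) =====
theorem check_conj_spec : Claim_equal_check_conj := by
  intro hop_ind i _ _
  unfold Spec_check_conj
  exact check_conj_eq_alt (2 - i).toNat hop_ind i le_rfl
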